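-- pv_equiv track=rewrite | github.com/blueknight-io/blueknight-task | app/services/vector_store.py | _normalize_geography_terms
-- ===== SOURCE A (Python) =====
-- def _normalize_geography_terms(values: list[str] | None) -> list[str]:
--     if not values:
--         return []
--
--     aliases: dict[str, list[str]] = {
--         "uk": [
--             "United Kingdom",
--             "UK",
--             "Great Britain",
--             "Britain",
--             "England",
--             "Scotland",
--             "Wales",
--             "Northern Ireland",
--         ],
--         "united kingdom": [
--             "United Kingdom",
--             "UK",
--             "Great Britain",
--             "Britain",
--             "England",
--             "Scotland",
--             "Wales",
--             "Northern Ireland",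
--         ],
--         "us": ["United States", "USA", "US", "United States of America"],
--         "usa": ["United States", "USA", "US", "United States of America"],
--         "united states": ["United States", "USA", "US", "United States of America"],
--     }
--
--     terms: list[str] = []
--     seen: set[str] = set()
--     for value in values:
--         normalized = value.strip().lower()
--         if not normalized:
--             continue
--         expanded = aliases.get(normalized, [value.strip()])
--         for term in expanded:
--             if term not in seen:
--                 seen.add(term)
--                 terms.append(term)
--     return terms
-- ===== SOURCE B (Python) =====
-- def _normalize_geography_terms(values: list[str] | None) -> list[str]:
--     if not values:
--         return []
--
--     aliases: dict[str, list[str]] = {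
--         "uk": [
--             "United Kingdom",
--             "UK",
--             "Great Britain",
--             "Britain",
--             "England",
--             "Scotland",
--             "Wales",
--             "Northern Ireland",
--         ],
--         "united kingdom": [
--             "United Kingdom",
--             "UK",
--             "Great Britain",
--             "Britain",
--             "England",
--             "Scotland",
--             "Wales",
--             "Northern Ireland",
--         ],
--         "us": ["United States", "USA", "US", "United States of America"],
--         "usa": ["United States", "USA", "US", "United States of America"],
--         "united states": ["United States", "USA", "US", "United States of America"],
--     }
--
--     def expand(value: str) -> list[str]:
--         normalized = value.strip().lower()
--         if not normalized:
--             return []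
--         return aliases.get(normalized, [value.strip()])
--
--     # build the result back-to-front: walk the values in reverse, each step putting the
--     # current value's (duplicate-free) expansion in front and dropping the terms it
--     # already contains from the partial result -- no seen set at all
--     result: list[str] = []
--     for value in reversed(values):
--         head = expand(value)
--         result = head + [t for t in result if t not in head]
--     return result
-- ===== Notes on version B (the rewrite author's own statement) =====
-- stated objective: alternative
-- what changed: Replaces A's single forward loop with an interleaved seen-set by a back-to-front construction: walk the values in reverse, and at each step prepend the current value's expansion and drop the terms it contains from the partial result with a filter -- no seen set or dict at all.
import Mathlib
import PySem

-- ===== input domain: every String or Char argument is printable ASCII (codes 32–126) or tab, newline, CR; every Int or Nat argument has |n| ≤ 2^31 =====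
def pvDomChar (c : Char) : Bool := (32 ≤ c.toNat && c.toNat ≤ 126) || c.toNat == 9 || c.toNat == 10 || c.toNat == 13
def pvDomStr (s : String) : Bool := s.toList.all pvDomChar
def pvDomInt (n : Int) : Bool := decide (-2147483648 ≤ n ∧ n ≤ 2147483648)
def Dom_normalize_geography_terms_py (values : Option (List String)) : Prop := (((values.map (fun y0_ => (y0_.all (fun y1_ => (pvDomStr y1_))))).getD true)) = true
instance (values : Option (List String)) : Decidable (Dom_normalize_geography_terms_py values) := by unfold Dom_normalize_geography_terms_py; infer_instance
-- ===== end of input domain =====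

-- B replaces A's forward loop with its interleaved seen set by a back-to-front construction:
-- walk the values in reverse, each step prepending the current expansion and filtering its
-- terms out of the partial result (a filter; no seen set). Alternative decomposition.

-- shared data: the alias table (a literal dict in both Pythons)
def pvUKTerms : List String :=
  ["United Kingdom", "UK", "Great Britain", "Britain", "England", "Scotland", "Wales", "Northern Ireland"]
def pvUSTerms : List String :=
  ["United States", "USA", "US", "United States of America"]
def pvAliases : PySem.Dict String (List String) :=
  PySem.Dict.ofList
    [("uk", pvUKTerms), ("united kingdom", pvUKTerms),
     ("us", pvUSTerms), ("usa", pvUSTerms), ("united states", pvUSTerms)]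

-- ===== PORT A =====
-- one loop over values; inner loop over the expansion appends term-by-term, guarded by a seen set
def normalize_geography_terms_py (values : Option (List String)) : List String :=
  match values with
  | none => []
  | some vs =>
    if vs.isEmpty then []
    else
      (vs.foldl
        (fun (st : List String × PySem.Set String) value =>
          let normalized := PySem.Str.lower (PySem.Str.strip value)
          if normalized = "" then st
          else
            let expanded := PySem.Dict.getD pvAliases normalized [PySem.Str.strip value]
            expanded.foldl
              (fun st term =>
                if PySem.Set.contains st.2 term then st
                else (st.1 ++ [term], PySem.Set.add st.2 term)) st)
        ([], PySem.Set.empty)).1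

-- ===== PORT B =====
-- Source B's helper 'expand': one value's list of terms ([] when the normalized value is empty)
def pvExpand (value : String) : List String :=
  let normalized := PySem.Str.lower (PySem.Str.strip value)
  if normalized = "" then []
  else PySem.Dict.getD pvAliases normalized [PySem.Str.strip value]

def normalize_geography_terms_py_alt (values : Option (List String)) : List String :=
  match values with
  | none => []
  | some vs =>
    if vs.isEmpty then []
    else
      -- 'for value in reversed(values): result = head + [t for t in result if t not in head]'
      vs.reverse.foldl
        (fun result value =>
          let head := pvExpand value
          head ++ result.filter (fun t => !(head.contains t))) []

-- ===== PRECONDITION & SPEC =====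
def Spec_normalize_geography_terms_py (values : Option (List String)) (out : List String) : Prop := out = normalize_geography_terms_py_alt values
instance (values : Option (List String)) (out : List String) : Decidable (Spec_normalize_geography_terms_py values out) := by unfold Spec_normalize_geography_terms_py; infer_instance

-- ===== CLAIM (what is proved, stated in full; the proofs are below) =====
def Claim_equal_normalize_geography_terms_py : Prop := ∀ (values : Option (List String)), Dom_normalize_geography_terms_py values → Spec_normalize_geography_terms_py values (normalize_geography_terms_py values)

-- ===== LEMMAS AND PROOFS =====

-- the alias table only yields one of its two value lists, or the default
theorem pv_getD_cases (n : String) (d : List String) :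
    PySem.Dict.getD pvAliases n d = pvUKTerms ∨
    PySem.Dict.getD pvAliases n d = pvUSTerms ∨
    PySem.Dict.getD pvAliases n d = d := by
  unfold PySem.Dict.getD PySem.Dict.get?
  cases h : List.find? (fun p => p.1 == n) pvAliases.items with
  | none => simp
  | some p =>
    have hmem := List.mem_of_find?_eq_some h
    have hitems : pvAliases.items =
        [("uk", pvUKTerms), ("united kingdom", pvUKTerms),
         ("us", pvUSTerms), ("usa", pvUSTerms), ("united states", pvUSTerms)] := by decide
    rw [hitems] at hmem
    simp only [List.mem_cons, List.not_mem_nil, or_false] at hmem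
    rcases hmem with h' | h' | h' | h' | h' <;> subst h' <;> simp

-- each expansion list is duplicate-free
theorem pvExpand_nodup (v : String) : (pvExpand v).Nodup := by
  unfold pvExpand
  by_cases h : PySem.Str.lower (PySem.Str.strip v) = ""
  · simp [h]
  · simp only [h, if_false]
    rcases pv_getD_cases (PySem.Str.lower (PySem.Str.strip v)) [PySem.Str.strip v] with h' | h' | h' <;>
      rw [h'] <;> first | decide | simp

-- a duplicate-free list is its own set
theorem pv_ofList_of_nodup (l : List String) (h : l.Nodup) : PySem.Set.ofList l = l := by
  rw [← PySem.Set.update_nil_left, PySem.Set.update_eq_append_of_disjoint _ _ h (by simp)]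
  simp

-- B's reverse fold computes the first-occurrence dedup of the concatenated expansions
theorem pv_merge (vs : List String) :
    vs.foldr
      (fun value result =>
        let head := pvExpand value
        head ++ result.filter (fun t => !(head.contains t))) []
    = PySem.Set.ofList (vs.flatMap pvExpand) := by
  induction vs with
  | nil => rfl
  | cons v vs ih =>
    simp only [List.foldr_cons, List.flatMap_cons, PySem.Set.ofList_append,
      pv_ofList_of_nodup (pvExpand v) (pvExpand_nodup v), PySem.Set.update_eq_append_filter, ih]
    simp [PySem.Set.contains]

-- A's inner loop keeps the state diagonal: terms and seen stay equal, and one term list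
-- folded from the diagonal state (s, s) is s.foldl Set.add, i.e. s updated with the terms
theorem pv_inner (ts : List String) (s : List String) :
    ts.foldl
      (fun (st : List String × PySem.Set String) term =>
        if PySem.Set.contains st.2 term then st
        else (st.1 ++ [term], PySem.Set.add st.2 term)) (s, s)
    = (ts.foldl PySem.Set.add s, ts.foldl PySem.Set.add s) := by
  induction ts generalizing s with
  | nil => rfl
  | cons t ts ih =>
    simp only [List.foldl_cons]
    by_cases h : t ∈ s
    · rw [if_pos (by simpa [PySem.Set.contains_iff] using h), PySem.Set.add_of_mem h]
      exact ih s
    · rw [if_neg (by simpa [PySem.Set.contains_iff] using h), PySem.Set.add_of_not_mem h]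
      exact ih _

-- A's outer loop from a diagonal state computes s updated with the concatenation of all expansions
theorem pv_outer (vs : List String) (s : List String) :
    (vs.foldl
      (fun (st : List String × PySem.Set String) value =>
        let normalized := PySem.Str.lower (PySem.Str.strip value)
        if normalized = "" then st
        else
          let expanded := PySem.Dict.getD pvAliases normalized [PySem.Str.strip value]
          expanded.foldl
            (fun st term =>
              if PySem.Set.contains st.2 term then st
              else (st.1 ++ [term], PySem.Set.add st.2 term)) st) (s, s))
    = (PySem.Set.update s (vs.flatMap pvExpand), PySem.Set.update s (vs.flatMap pvExpand)) := by
  induction vs generalizing s with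
  | nil => simp [PySem.Set.update]
  | cons v vs ih =>
    simp only [List.foldl_cons, List.flatMap_cons, pvExpand]
    by_cases h : PySem.Str.lower (PySem.Str.strip v) = ""
    · simpa [h] using ih s
    · rw [if_neg h, if_neg h, pv_inner, ih]
      simp [PySem.Set.update, List.foldl_append]

-- ===== VERDICT (by name: the statement is the Claim_ definition above) =====
theorem normalize_geography_terms_py_spec : Claim_equal_normalize_geography_terms_py := by
  intro values _
  unfold Spec_normalize_geography_terms_py normalize_geography_terms_py normalize_geography_terms_py_alt
  match values with
  | none => rfl
  | some vs =>
    by_cases hvs : vs.isEmpty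
    · simp [hvs]
    · simp only [hvs, Bool.false_eq_true, if_false]
      rw [List.foldl_reverse, pv_merge, ← PySem.Set.update_empty]
      exact congrArg Prod.fst (pv_outer vs [])
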